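-- pv_equiv track=rewrite | github.com/makalin/LangAdvisor | langadvisor.py | recommend_language
-- ===== SOURCE A (Python) =====
-- def recommend_language(scores):
--     max_score = max(scores.values())
--     recommended_languages = [lang for lang, score in scores.items() if score == max_score]
--
--     if max_score == 0:
--         return "No clear match found. Try providing more specific details in your prompt."
--     if len(recommended_languages) == 1:
--         return f"The best programming language for your use case is: {recommended_languages[0]}"
--     else:
--         return f"Multiple languages could work for your use case: {', '.join(recommended_languages)}"
-- ===== SOURCE B (Python) =====
-- def recommend_language(scores):
--     best = None
--     langs = []
--     for lang, score in scores.items():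
--         if best is None or score > best:
--             best = score
--             langs = [lang]
--         elif score == best:
--             langs.append(lang)
--     if best == 0:
--         return "No clear match found. Try providing more specific details in your prompt."
--     if len(langs) == 1:
--         return f"The best programming language for your use case is: {langs[0]}"
--     return f"Multiple languages could work for your use case: {', '.join(langs)}"
-- ===== Notes on version B (the rewrite author's own statement) =====
-- stated objective: alternative
-- what changed: Replaces max() over all values plus a second filtering pass with a single fused loop tracking the running best score and the candidate list; Pre_ excludes the empty dict, on which A's max() raises ValueError (B's loop just falls through there).
import Mathlib
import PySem

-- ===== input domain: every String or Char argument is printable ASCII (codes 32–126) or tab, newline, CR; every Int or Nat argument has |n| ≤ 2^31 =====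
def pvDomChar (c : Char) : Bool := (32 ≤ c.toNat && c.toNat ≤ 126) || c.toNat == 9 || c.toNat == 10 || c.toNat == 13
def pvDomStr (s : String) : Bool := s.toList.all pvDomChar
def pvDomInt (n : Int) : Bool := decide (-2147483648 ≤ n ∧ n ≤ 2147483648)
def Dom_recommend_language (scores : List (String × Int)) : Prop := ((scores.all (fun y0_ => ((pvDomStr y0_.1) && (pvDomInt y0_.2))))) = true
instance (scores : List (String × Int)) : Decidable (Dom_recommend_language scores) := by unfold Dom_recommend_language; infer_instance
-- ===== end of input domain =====

-- B fuses A's max() pass and the filtering pass into one loop over the items (same cost, different decomposition).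


-- ===== PORT A =====
def recommend_language (scores : List (String × Int)) : String :=
  match PySem.List.max? (scores.map Prod.snd) (fun x => x) with
  | none => ""   -- max() raises ValueError on an empty dict; excluded by Pre_
  | some max_score =>
    let recommended_languages := (scores.filter (fun p => p.2 == max_score)).map Prod.fst
    if max_score == 0 then
      "No clear match found. Try providing more specific details in your prompt."
    else if recommended_languages.length == 1 then
      "The best programming language for your use case is: " ++ recommended_languages.headD ""
    else
      "Multiple languages could work for your use case: " ++ PySem.Str.join ", " recommended_languages

-- ===== PORT B =====
-- one step of B's fused loop: reset on strictly greater score, append on equal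
def rlAltStep (st : Option Int × List String) (p : String × Int) : Option Int × List String :=
  match st with
  | (none, _) => (some p.2, [p.1])
  | (some b, langs) =>
    if b < p.2 then (some p.2, [p.1])
    else if p.2 == b then (some b, langs ++ [p.1])
    else (some b, langs)

def recommend_language_alt (scores : List (String × Int)) : String :=
  match scores.foldl rlAltStep (none, []) with
  | (best, langs) =>
    if best == some 0 then
      "No clear match found. Try providing more specific details in your prompt."
    else if langs.length == 1 then
      "The best programming language for your use case is: " ++ langs.headD ""
    else
      "Multiple languages could work for your use case: " ++ PySem.Str.join ", " langs

-- ===== PRECONDITION & SPEC =====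
-- Pre_ excludes only the empty dict, on which A's max() raises ValueError.
def Pre_recommend_language (scores : List (String × Int)) : Prop := scores ≠ []
instance (scores : List (String × Int)) : Decidable (Pre_recommend_language scores) := by unfold Pre_recommend_language; infer_instance
def pvWitness_recommend_language : (List (String × Int)) := [("python", 2), ("go", 2), ("c", 1)]

def Spec_recommend_language (scores : List (String × Int)) (out : String) : Prop := out = recommend_language_alt scores
instance (scores : List (String × Int)) (out : String) : Decidable (Spec_recommend_language scores out) := by unfold Spec_recommend_language; infer_instance

-- ===== CLAIM (what is proved, stated in full; the proofs are below) =====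
def Claim_equal_recommend_language : Prop := ∀ (scores : List (String × Int)), Dom_recommend_language scores → Pre_recommend_language scores → Spec_recommend_language scores (recommend_language scores)

-- ===== LEMMAS AND PROOFS =====

-- running max over the pair list
def rlMax (b : Int) (l : List (String × Int)) : Int := l.foldl (fun m p => max m p.2) b

lemma rlMax_le (l : List (String × Int)) : ∀ b : Int, b ≤ rlMax b l := by
  induction l with
  | nil => intro b; simp [rlMax]
  | cons p t ih =>
    intro b
    exact le_trans (le_max_left b p.2) (ih (max b p.2))

-- invariant of B's fused loop, in terms of A's two passes
lemma rlLoop_spec (l : List (String × Int)) : ∀ (b : Int) (acc : List String),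
    l.foldl rlAltStep (some b, acc) =
      (some (rlMax b l),
       (if b == rlMax b l then acc else []) ++ (l.filter (fun p => p.2 == rlMax b l)).map Prod.fst) := by
  induction l with
  | nil => intro b acc; simp [rlMax]
  | cons p t ih =>
    intro b acc
    have hM : rlMax b (p :: t) = rlMax (max b p.2) t := by simp [rlMax]
    by_cases h1 : b < p.2
    · have hmx : max b p.2 = p.2 := by omega
      have hb : b ≠ rlMax b (p :: t) := by
        have := rlMax_le t p.2
        rw [hM, hmx]; omega
      simp only [List.foldl_cons, rlAltStep, if_pos h1, ih]
      rw [hM, hmx]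
      simp only [List.filter_cons]
      have hbne : (b == rlMax p.2 t) = false := by
        rw [hM, hmx] at hb; simp [hb]
      rw [hbne]
      by_cases h2 : p.2 = rlMax p.2 t
      · have e2 : (p.2 == rlMax p.2 t) = true := by simpa using h2
        rw [e2]; simp
      · have e2 : (p.2 == rlMax p.2 t) = false := by simpa using h2
        rw [e2]; simp
    · have hmx : max b p.2 = b := by omega
      simp only [List.foldl_cons, rlAltStep, if_neg h1]
      rw [hM, hmx]
      by_cases h2 : p.2 = b
      · simp only [h2, beq_self_eq_true, if_pos, ih]
        simp only [List.filter_cons, h2]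
        by_cases h3 : b = rlMax b t
        · have e1 : (b == rlMax b t) = true := by simpa using h3
          simp [e1]
        · have e1 : (b == rlMax b t) = false := by simpa using h3
          simp [e1]
      · have h2' : (p.2 == b) = false := by simp [h2]
        rw [h2', if_neg (by simp)]
        rw [ih]
        simp only [List.filter_cons]
        have : (p.2 == rlMax b t) = false := by
          have := rlMax_le t b
          have : p.2 ≠ rlMax b t := by omega
          simp [this]
        rw [this]
        simp

lemma rlMax_eq_foldl_map (t : List (String × Int)) (b : Int) :
    (t.map Prod.snd).foldl max b = rlMax b t := by
  simp [rlMax, List.foldl_map]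

-- ===== VERDICT (by name: the statement is the Claim_ definition above) =====
theorem recommend_language_spec : Claim_equal_recommend_language := by
  intro scores _ hpre
  unfold Spec_recommend_language
  match scores with
  | [] => exact absurd rfl hpre
  | x :: t =>
    unfold recommend_language recommend_language_alt
    rw [show (x :: t).map Prod.snd = x.2 :: t.map Prod.snd from rfl,
        PySem.List.max?_id_cons, rlMax_eq_foldl_map]
    simp only [List.foldl_cons, rlAltStep, rlLoop_spec]
    simp only [List.filter_cons]
    by_cases h : x.2 = rlMax x.2 t
    · have e1 : (x.2 == rlMax x.2 t) = true := by simpa using h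
      rw [e1]; simp; rfl
    · have e1 : (x.2 == rlMax x.2 t) = false := by simpa using h
      rw [e1]; simp
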